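-- pv_equiv track=rewrite | github.com/davidhouseholter/sdd-benchmark-site | build_assets.py | compute_page_stats
-- ===== SOURCE A (Python) =====
-- def compute_page_stats(match_lookup: dict, page: str) -> dict:
--     """Count hits/misses/confusions for a page from the match lookup."""
--     stats = {"hits": 0, "misses": 0, "confusions": 0}
--     page_matches = match_lookup.get(page, {})
--     for results in page_matches.values():
--         for r in results:
--             if r == "hit":
--                 stats["hits"] += 1
--             elif r == "type_confusion":
--                 stats["confusions"] += 1
--             else:
--                 stats["misses"] += 1
--     return stats
-- ===== SOURCE B (Python) =====
-- def compute_page_stats(match_lookup: dict, page: str) -> dict: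
--     """Count hits/misses/confusions for a page from the match lookup."""
--     flat = [r for results in match_lookup.get(page, {}).values() for r in results]
--     hits = flat.count("hit")
--     confusions = flat.count("type_confusion")
--     return {"hits": hits, "misses": len(flat) - hits - confusions, "confusions": confusions}
-- ===== Notes on version B (the rewrite author's own statement) =====
-- stated objective: simpler
-- what changed: Replaces the per-element three-way branching loop with a flatten of all result lists followed by two count passes, deriving the miss count arithmetically as total - hits - confusions.
import Mathlib
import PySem

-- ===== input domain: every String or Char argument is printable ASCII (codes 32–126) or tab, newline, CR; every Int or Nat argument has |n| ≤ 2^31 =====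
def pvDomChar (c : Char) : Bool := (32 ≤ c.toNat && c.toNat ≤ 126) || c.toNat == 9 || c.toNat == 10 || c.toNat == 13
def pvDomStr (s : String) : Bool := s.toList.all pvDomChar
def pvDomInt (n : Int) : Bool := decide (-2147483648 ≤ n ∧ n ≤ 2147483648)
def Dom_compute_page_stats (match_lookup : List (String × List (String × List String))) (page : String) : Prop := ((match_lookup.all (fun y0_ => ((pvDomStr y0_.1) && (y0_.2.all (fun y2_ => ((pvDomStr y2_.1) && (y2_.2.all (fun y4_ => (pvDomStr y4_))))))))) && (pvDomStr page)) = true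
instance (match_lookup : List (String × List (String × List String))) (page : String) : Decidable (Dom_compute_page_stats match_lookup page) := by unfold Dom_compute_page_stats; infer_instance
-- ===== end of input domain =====

-- B flattens all result lists, counts hits and confusions, and derives misses as
-- total - hits - confusions instead of counting each element in a three-way branch (simpler).

-- ===== PORT A =====
-- one iteration of A's inner loop body over the stats dict
def pvStepA (stats : PySem.Dict String Int) (r : String) : PySem.Dict String Int :=
  if r == "hit" then stats.insert "hits" (stats.getD "hits" 0 + 1)
  else if r == "type_confusion" then stats.insert "confusions" (stats.getD "confusions" 0 + 1)
  else stats.insert "misses" (stats.getD "misses" 0 + 1)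

def compute_page_stats (match_lookup : List (String × List (String × List String))) (page : String) : List (String × Int) :=
  let stats : PySem.Dict String Int :=
    ((PySem.Dict.empty.insert "hits" 0).insert "misses" 0).insert "confusions" 0
  let page_matches := (List.lookup page match_lookup).getD []
  (page_matches.foldl (fun st kv => kv.2.foldl pvStepA st) stats).items

-- ===== PORT B =====
def compute_page_stats_alt (match_lookup : List (String × List (String × List String))) (page : String) : List (String × Int) :=
  let flat := ((List.lookup page match_lookup).getD []).flatMap (fun kv => kv.2)
  let hits : Int := flat.count "hit"
  let confusions : Int := flat.count "type_confusion"
  [("hits", hits), ("misses", (flat.length : Int) - hits - confusions), ("confusions", confusions)]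

-- ===== PRECONDITION & SPEC =====
def Spec_compute_page_stats (match_lookup : List (String × List (String × List String))) (page : String) (out : List (String × Int)) : Prop := out = compute_page_stats_alt match_lookup page
instance (match_lookup : List (String × List (String × List String))) (page : String) (out : List (String × Int)) : Decidable (Spec_compute_page_stats match_lookup page out) := by unfold Spec_compute_page_stats; infer_instance

-- ===== CLAIM (what is proved, stated in full; the proofs are below) =====
def Claim_equal_compute_page_stats : Prop := ∀ (match_lookup : List (String × List (String × List String))) (page : String), Dom_compute_page_stats match_lookup page → Spec_compute_page_stats match_lookup page (compute_page_stats match_lookup page)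

-- ===== LEMMAS AND PROOFS =====

-- the nested fold over the value lists is the fold over the flattened list
theorem pv_foldl_nested (l : List (String × List String)) (s : PySem.Dict String Int) :
    l.foldl (fun st kv => kv.2.foldl pvStepA st) s = (l.flatMap (fun kv => kv.2)).foldl pvStepA s := by
  induction l generalizing s with
  | nil => rfl
  | cons hd tl ih => simp [List.foldl_append, ih]

theorem pv_step_miss (r : String) (hr : r ≠ "hit") (hc : r ≠ "type_confusion") (h m c : Int) :
    pvStepA (PySem.Dict.mk [("hits", h), ("misses", m), ("confusions", c)]) r =
      PySem.Dict.mk [("hits", h), ("misses", m + 1), ("confusions", c)] := by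
  unfold pvStepA
  rw [if_neg (by simp [hr]), if_neg (by simp [hc])]
  rfl

-- A's fold over a flat list of results, from a canonical stats dict, counted in closed form
theorem pv_foldl_counts (l : List String) (h m c : Int) :
    l.foldl pvStepA (PySem.Dict.mk [("hits", h), ("misses", m), ("confusions", c)]) =
      PySem.Dict.mk [("hits", h + l.count "hit"),
        ("misses", m + ((l.length : Int) - l.count "hit" - l.count "type_confusion")),
        ("confusions", c + l.count "type_confusion")] := by
  induction l generalizing h m c with
  | nil => simp
  | cons r tl ih =>
    by_cases hr : r = "hit"
    · subst hr
      rw [List.foldl_cons,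
        show pvStepA (PySem.Dict.mk [("hits", h), ("misses", m), ("confusions", c)]) "hit" =
          PySem.Dict.mk [("hits", h + 1), ("misses", m), ("confusions", c)] from rfl, ih]
      simp
      omega
    · by_cases hc : r = "type_confusion"
      · subst hc
        rw [List.foldl_cons,
          show pvStepA (PySem.Dict.mk [("hits", h), ("misses", m), ("confusions", c)]) "type_confusion" =
            PySem.Dict.mk [("hits", h), ("misses", m), ("confusions", c + 1)] from rfl, ih]
        simp [hr]
        omega
      · rw [List.foldl_cons, pv_step_miss r hr hc, ih]
        simp [hr, hc]
        omega

-- ===== VERDICT (by name: the statement is the Claim_ definition above) =====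
theorem compute_page_stats_spec : Claim_equal_compute_page_stats := by
  intro ml page _
  show (((List.lookup page ml).getD []).foldl (fun st kv => kv.2.foldl pvStepA st)
      (PySem.Dict.mk [("hits", 0), ("misses", 0), ("confusions", 0)])).items =
    compute_page_stats_alt ml page
  rw [pv_foldl_nested, pv_foldl_counts]
  simp [compute_page_stats_alt]
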